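-- pv_equiv track=rewrite | github.com/EpsilonLabsInc/epsml | old_repos/epsdatasets/epsdatasets/helpers/gradient_cr/create_training_files_from_binary_gpt_labels.py | get_labels_distribution
-- ===== SOURCE A (Python) =====
-- TARGET_LABELS = ["Edema"]
--
-- def get_labels_distribution(images):
--     labels_dist = {item: 0 for item in TARGET_LABELS}
--     newly_added_labels = set()
--
--     for image in images:
--         for label in image["labels"]:
--             if label in labels_dist:
--                 labels_dist[label] += 1
--             else:
--                 newly_added_labels.add(label)
--                 labels_dist[label] = 1
--
--     return labels_dist, newly_added_labels
-- ===== SOURCE B (Python) =====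
-- TARGET_LABELS = ["Edema"]
--
-- def get_labels_distribution(images):
--     # Phase 1: flatten all labels and build one frequency table (no branching).
--     all_labels = [label for image in images for label in image["labels"]]
--     counts = {}
--     for label in all_labels:
--         counts[label] = counts.get(label, 0) + 1
--     # Phase 2: reshape — targets first (seeded with 0), then new labels in
--     # first-appearance order (dict.update overwrites targets in place and
--     # appends the rest in counts' insertion order).
--     labels_dist = {t: 0 for t in TARGET_LABELS}
--     labels_dist.update(counts)
--     return labels_dist, set(counts) - set(TARGET_LABELS)
-- ===== Notes on version B (the rewrite author's own statement) =====
-- stated objective: alternative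
-- what changed: A's single pass with a per-label membership branch is replaced by a two-phase decomposition: flatten all labels, build one frequency table (counts.get(l,0)+1, no branching), then reshape it over the seeded target dict with dict.update and obtain the new labels as a set difference.
import Mathlib
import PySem

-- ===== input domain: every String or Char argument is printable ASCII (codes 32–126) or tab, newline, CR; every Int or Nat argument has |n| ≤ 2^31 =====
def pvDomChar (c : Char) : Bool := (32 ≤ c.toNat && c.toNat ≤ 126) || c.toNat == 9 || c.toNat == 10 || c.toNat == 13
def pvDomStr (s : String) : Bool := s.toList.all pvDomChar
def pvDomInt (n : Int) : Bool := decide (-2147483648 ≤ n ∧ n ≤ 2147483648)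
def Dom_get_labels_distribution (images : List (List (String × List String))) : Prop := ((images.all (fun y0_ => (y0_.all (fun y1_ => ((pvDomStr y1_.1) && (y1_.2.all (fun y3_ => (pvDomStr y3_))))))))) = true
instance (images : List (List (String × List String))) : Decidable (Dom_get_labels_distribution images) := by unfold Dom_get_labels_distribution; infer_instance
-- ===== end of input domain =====

-- B replaces A's one-pass branching loop with a two-phase decomposition (flatten all
-- labels + build one frequency table, then reshape it over the seeded targets);
-- same cost, return values proved equal.

def TARGET_LABELS : List String := ["Edema"]

-- ===== PORT A =====
-- literal transliteration of A: one nested loop over images/labels carrying the pair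
-- (labels_dist, newly_added_labels), branching on dict membership per label.
-- image["labels"] is PySem.Dict getD, exact under Pre_ (KeyError excluded there).
def get_labels_distribution (images : List (List (String × List String))) : (List (String × Int)) × List String :=
  let init : PySem.Dict String Int :=
    TARGET_LABELS.foldl (fun d item => d.insert item 0) PySem.Dict.empty
  let st :=
    images.foldl (fun (st : PySem.Dict String Int × PySem.Set String) image =>
      ((PySem.Dict.mk image).getD "labels" []).foldl (fun st label =>
        if st.1.contains label then
          (st.1.insert label (st.1.getD label 0 + 1), st.2)
        else
          (st.1.insert label 1, st.2.add label)) st)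
      (init, PySem.Set.empty)
  (st.1.items, st.2)

-- ===== PORT B =====
-- literal transliteration of Source B: flatten, count (counts[l] = counts.get(l,0)+1 is
-- exactly Dict.modify), seed targets with 0, dict.update, set difference.
def get_labels_distribution_alt (images : List (List (String × List String))) : (List (String × Int)) × List String :=
  let all_labels := images.flatMap (fun image => (PySem.Dict.mk image).getD "labels" [])
  let counts : PySem.Dict String Int :=
    all_labels.foldl (fun c label => c.modify label 0 (· + 1)) PySem.Dict.empty
  let labels_dist0 : PySem.Dict String Int :=
    TARGET_LABELS.foldl (fun d t => d.insert t 0) PySem.Dict.empty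
  let labels_dist := labels_dist0.update counts.items
  (labels_dist.items, PySem.Set.diff (PySem.Set.ofList counts.keys) (PySem.Set.ofList TARGET_LABELS))

-- ===== PRECONDITION & SPEC =====
-- Pre_ excludes exactly the inputs where some image lacks the "labels" key: there the
-- Python A raises KeyError (and B raises the same KeyError).
def Pre_get_labels_distribution (images : List (List (String × List String))) : Prop :=
  ∀ image ∈ images, "labels" ∈ image.map Prod.fst
instance (images : List (List (String × List String))) : Decidable (Pre_get_labels_distribution images) := by unfold Pre_get_labels_distribution; infer_instance

def pvWitness_get_labels_distribution : (List (List (String × List String))) :=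
  [[("labels", ["Edema", "Flu"])], [("labels", [])]]

def Spec_get_labels_distribution (images : List (List (String × List String))) (out : (List (String × Int)) × List String) : Prop := out = get_labels_distribution_alt images
instance (images : List (List (String × List String))) (out : (List (String × Int)) × List String) : Decidable (Spec_get_labels_distribution images out) := by unfold Spec_get_labels_distribution; infer_instance

-- ===== CLAIM (what is proved, stated in full; the proofs are below) =====
def Claim_equal_get_labels_distribution : Prop := ∀ (images : List (List (String × List String))), Dom_get_labels_distribution images → Pre_get_labels_distribution images → Spec_get_labels_distribution images (get_labels_distribution images)

-- ===== LEMMAS AND PROOFS =====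

-- A's initial dict {t: 0 for t in TARGET_LABELS}, and A's loop body, as named helpers
def pvInit : PySem.Dict String Int := PySem.Dict.empty.insert "Edema" 0
def pvStepA (st : PySem.Dict String Int × PySem.Set String) (label : String) :
    PySem.Dict String Int × PySem.Set String :=
  if st.1.contains label then
    (st.1.insert label (st.1.getD label 0 + 1), st.2)
  else
    (st.1.insert label 1, st.2.add label)

theorem pvAfold_char (L : List String) :
    (L.foldl pvStepA (pvInit, PySem.Set.empty)).1.keys = PySem.Set.update ["Edema"] L
    ∧ (∀ k, (L.foldl pvStepA (pvInit, PySem.Set.empty)).1.getD k 0 = (L.count k : Int))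
    ∧ (L.foldl pvStepA (pvInit, PySem.Set.empty)).2
        = (PySem.Set.ofList L).filter (fun x => !(x == "Edema")) := by
  induction L using List.reverseRecOn with
  | nil =>
    refine ⟨rfl, ?_, rfl⟩
    intro k
    by_cases h : k = "Edema"
    · subst h; simp [pvInit]
    · simp [pvInit, PySem.Dict.getD_insert, h]
  | append_singleton L l ih =>
    obtain ⟨hkeys, hgetD, hset⟩ := ih
    rw [List.foldl_append, List.foldl_cons, List.foldl_nil]
    set st := L.foldl pvStepA (pvInit, PySem.Set.empty) with hst
    have hmem : st.1.contains l = decide (l ∈ st.1.keys) :=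
      PySem.Dict.contains_eq_decide_mem_keys st.1 l
    by_cases hin : l ∈ st.1.keys
    · -- contains: dist updated in place, set unchanged
      have hc : st.1.contains l = true := by rw [hmem]; simp [hin]
      have hl : l = "Edema" ∨ l ∈ L := by
        have := hin; rw [hkeys] at this
        simpa [PySem.Set.mem_update] using this
      refine ⟨?_, ?_, ?_⟩
      · rw [pvStepA, hc]
        simp only [if_true]
        rw [PySem.Dict.keys_insert_of_contains _ _ hc, hkeys,
          PySem.Set.update_append, PySem.Set.update_cons]
        have : (PySem.Set.update ["Edema"] L).add l = PySem.Set.update ["Edema"] L := by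
          apply PySem.Set.add_of_mem
          rw [PySem.Set.mem_update]; simpa using hl
        rw [this]
        rfl
      · intro k
        rw [pvStepA, hc]
        simp only [if_true]
        rw [PySem.Dict.getD_insert]
        by_cases hk : k = l
        · subst hk; simp [hgetD, List.count_append]
        · simp [hk, Ne.symm hk, hgetD, List.count_append]
      · rw [pvStepA, hc]
        simp only [if_true]
        rw [hset, PySem.Set.ofList_append_singleton]
        by_cases hm : l ∈ PySem.Set.ofList L
        · rw [PySem.Set.add_of_mem hm]
        · have hle : l = "Edema" := by
            rcases hl with h | h
            · exact h
            · exact absurd ((PySem.Set.mem_ofList L l).mpr h) hm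
          rw [PySem.Set.add_of_not_mem hm, List.filter_append]
          simp [hle]
    · -- new label
      have hc : st.1.contains l = false := by rw [hmem]; simp [hin]
      have hl : ¬ (l = "Edema" ∨ l ∈ L) := by
        rw [hkeys] at hin; simpa [PySem.Set.mem_update] using hin
      have hl : l ≠ "Edema" ∧ l ∉ L := ⟨fun h => hl (Or.inl h), fun h => hl (Or.inr h)⟩
      refine ⟨?_, ?_, ?_⟩
      · rw [pvStepA, hc]
        simp only [Bool.false_eq_true, if_false]
        rw [PySem.Dict.keys_insert_of_not_contains _ _ hc, hkeys,
          PySem.Set.update_append, PySem.Set.update_cons]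
        have : (PySem.Set.update ["Edema"] L).add l = PySem.Set.update ["Edema"] L ++ [l] := by
          apply PySem.Set.add_of_not_mem
          rw [PySem.Set.mem_update]; simp; tauto
        rw [this]; rfl
      · intro k
        rw [pvStepA, hc]
        simp only [Bool.false_eq_true, if_false]
        rw [PySem.Dict.getD_insert]
        by_cases hk : k = l
        · subst hk
          have : L.count k = 0 := List.count_eq_zero.mpr hl.2
          simp [List.count_append, this]
        · simp [hk, Ne.symm hk, hgetD, List.count_append]
      · rw [pvStepA, hc]
        simp only [Bool.false_eq_true, if_false]
        have h1 : PySem.Set.ofList (L ++ [l]) = PySem.Set.ofList L ++ [l] := by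
          rw [PySem.Set.ofList_append_singleton]
          exact PySem.Set.add_of_not_mem (by simpa [PySem.Set.mem_ofList] using hl.2)
        have h2 : st.2.add l = st.2 ++ [l] := by
          apply PySem.Set.add_of_not_mem
          rw [hset]
          intro hm
          exact hl.2 (by simpa [PySem.Set.mem_ofList] using (List.mem_filter.mp hm).1)
        rw [h2, h1, List.filter_append, hset]
        simp [hl.1]

theorem pvFind?_beq (s : List String) (k : String) :
    s.find? (fun v => v == k) = if k ∈ s then some k else none := by
  induction s with
  | nil => simp
  | cons a s ih =>
    by_cases h : a = k
    · subst h; simp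
    · rw [List.find?_cons]
      have hb : (a == k) = false := by simp [h]
      simp [hb, ih, List.mem_cons, Ne.symm h]

theorem pvGetD_foldl_insert (ps : List (String × Int)) (d : PySem.Dict String Int)
    (hnd : (ps.map Prod.fst).Nodup) (k : String) :
    (ps.foldl (fun acc p => acc.insert p.1 p.2) d).getD k 0 =
      match ps.find? (fun p => p.1 == k) with
      | some p => p.2
      | none => d.getD k 0 := by
  induction ps generalizing d with
  | nil => simp
  | cons p ps ih =>
    obtain ⟨k1, v⟩ := p
    simp only [List.map_cons, List.nodup_cons] at hnd
    rw [List.foldl_cons, ih _ hnd.2, List.find?_cons]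
    by_cases h : k1 = k
    · subst h
      simp only [BEq.rfl]
      have hnone : ps.find? (fun q => q.1 == k1) = none := by
        rw [List.find?_eq_none]
        intro q hq
        simp only [beq_iff_eq]
        intro hqk
        exact hnd.1 (hqk ▸ List.mem_map_of_mem hq)
      rw [hnone, PySem.Dict.getD_insert_self]
    · have hb : (k1 == k) = false := by simp [h]
      rw [hb]
      cases hf : ps.find? (fun q => q.1 == k) with
      | some q => simp
      | none =>
        rw [PySem.Dict.getD_insert]
        simp [Ne.symm h]

theorem pvUpdate_ofList (L : List String) :
    PySem.Set.update ["Edema"] (PySem.Set.ofList L) = PySem.Set.update ["Edema"] L := by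
  rw [PySem.Set.update_eq_append_filter, PySem.Set.update_eq_append_filter,
    PySem.Set.ofList_ofList]

-- B-side dist getD
theorem pvB_getD (L : List String) (k : String) :
    (pvInit.update (PySem.Dict.counter L).items).getD k 0 = (L.count k : Int) := by
  rw [show pvInit.update (PySem.Dict.counter L).items
      = (PySem.Dict.counter L).items.foldl (fun acc p => acc.insert p.1 p.2) pvInit from rfl]
  rw [pvGetD_foldl_insert _ _ (by
    rw [show (PySem.Dict.counter L).items.map Prod.fst = (PySem.Dict.counter L).keys from rfl]
    exact PySem.Dict.nodup_keys_counter L) k]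
  rw [PySem.Dict.items_counter, List.find?_map]
  have hcomp : ((fun p : String × Int => p.1 == k) ∘ fun v => (v, (L.count v : Int)))
      = fun v => v == k := rfl
  rw [hcomp, pvFind?_beq]
  by_cases hm : k ∈ PySem.Set.ofList L
  · simp [(PySem.Set.mem_ofList L k).mp hm]
  · have hk0 : L.count k = 0 := List.count_eq_zero.mpr (fun h => hm ((PySem.Set.mem_ofList L k).mpr h))
    simp only [hm, if_false, Option.map_none]
    rw [hk0]
    by_cases h : k = "Edema"
    · subst h; simp [pvInit]
    · simp [pvInit, PySem.Dict.getD_insert, h]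

-- B-side dist keys
theorem pvB_keys (L : List String) :
    (pvInit.update (PySem.Dict.counter L).items).keys = PySem.Set.update ["Edema"] L := by
  have h := PySem.Dict.keys_foldl_insert_key (PySem.Dict.counter L).items Prod.fst
      (fun _ p => p.2) pvInit
  have h2 : (pvInit.update (PySem.Dict.counter L).items).keys
      = PySem.Set.update pvInit.keys ((PySem.Dict.counter L).items.map Prod.fst) := h
  rw [h2,
    show (PySem.Dict.counter L).items.map Prod.fst = (PySem.Dict.counter L).keys from rfl,
    PySem.Dict.keys_counter,
    show pvInit.keys = ["Edema"] from rfl, pvUpdate_ofList]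

-- ===== VERDICT (by name: the statement is the Claim_ definition above) =====
theorem get_labels_distribution_spec : Claim_equal_get_labels_distribution := by
  intro images _ _
  show get_labels_distribution images = get_labels_distribution_alt images
  rw [get_labels_distribution, get_labels_distribution_alt]
  set L := images.flatMap (fun image => (PySem.Dict.mk image).getD "labels" []) with hL
  -- A's nested fold = flat fold over L
  rw [show (TARGET_LABELS.foldl (fun d item => d.insert item 0) PySem.Dict.empty) = pvInit from rfl]
  rw [show images.foldl (fun (st : PySem.Dict String Int × PySem.Set String) image =>
        ((PySem.Dict.mk image).getD "labels" []).foldl (fun st label =>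
          if st.1.contains label then
            (st.1.insert label (st.1.getD label 0 + 1), st.2)
          else
            (st.1.insert label 1, st.2.add label)) st) (pvInit, PySem.Set.empty)
      = L.foldl pvStepA (pvInit, PySem.Set.empty) from (List.foldl_flatMap).symm]
  -- B's counts = counter L
  rw [show L.foldl (fun c label => c.modify label 0 (· + 1)) PySem.Dict.empty
      = PySem.Dict.counter L from (PySem.Dict.counter_eq_foldl L).symm]
  obtain ⟨hkeys, hgetD, hset⟩ := pvAfold_char L
  refine Prod.ext ?_ ?_
  · -- items component
    show (L.foldl pvStepA (pvInit, PySem.Set.empty)).1.items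
        = (pvInit.update (PySem.Dict.counter L).items).items
    rw [PySem.Dict.items_eq_map_keys _ (by
        rw [hkeys]; exact PySem.Set.nodup_update _ _ (by simp)) 0,
      PySem.Dict.items_eq_map_keys _ (by
        rw [pvB_keys]; exact PySem.Set.nodup_update _ _ (by simp)) 0,
      hkeys, pvB_keys]
    exact List.map_congr_left (fun k _ => by rw [hgetD, pvB_getD])
  · -- set component
    show (L.foldl pvStepA (pvInit, PySem.Set.empty)).2
        = PySem.Set.diff (PySem.Set.ofList (PySem.Dict.counter L).keys) (PySem.Set.ofList TARGET_LABELS)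
    rw [hset, PySem.Dict.keys_counter, PySem.Set.ofList_ofList]
    show _ = (PySem.Set.ofList L).filter (fun x => !(PySem.Set.contains (PySem.Set.ofList TARGET_LABELS) x))
    apply List.filter_congr
    intro x _
    have : PySem.Set.contains (PySem.Set.ofList TARGET_LABELS) x = (x == "Edema") := by
      cases h : x == "Edema" <;> simp_all [TARGET_LABELS]
    rw [this]
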